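-- pv_equiv track=rewrite | github.com/scottyfionnghall/garbage | practice/codewars/folding_array.py | fold_array
-- ===== SOURCE A (Python) =====
-- def fold_array(array,runs):
--     for run in range(runs):
--         middle = len(array)//2
--         if len(array) != 2:
--             if len(array) % 2 == 0:
--                 first_part = array[:middle]
--                 second_part = array[middle:]
--             else:
--                 first_part = array[:middle+1]
--                 second_part = array[middle+1:]
--             second_part = list(reversed(second_part))
--             for i in range(len(second_part)):
--                 first_part[i] = first_part[i] + second_part[i]
--                 array = first_part[:]
--         else:
--             first_part = array[0]
--             second_part = array[1]
--             array = []
--             array.append(first_part+second_part)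
--     return(array)
-- ===== SOURCE B (Python) =====
-- def fold_array(array, runs):
--     for _ in range(runs):
--         n = len(array)
--         half = n // 2
--         new = [array[i] + array[n - 1 - i] for i in range(half)]
--         if n % 2:
--             new.append(array[half])
--         array = new
--     return array
-- ===== Notes on version B (the rewrite author's own statement) =====
-- stated objective: faster
-- what changed: A splits the list into halves, reverses the second half and writes sums into the first half element by element, re-copying the whole list (array = first_part[:]) on every inner iteration, with a special case for length 2; B builds the folded list in one comprehension over mirror pairs array[i]+array[n-1-i], appending the middle element for odd lengths, with no split, reverse, per-iteration copy or length-2 case.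
import Mathlib
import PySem

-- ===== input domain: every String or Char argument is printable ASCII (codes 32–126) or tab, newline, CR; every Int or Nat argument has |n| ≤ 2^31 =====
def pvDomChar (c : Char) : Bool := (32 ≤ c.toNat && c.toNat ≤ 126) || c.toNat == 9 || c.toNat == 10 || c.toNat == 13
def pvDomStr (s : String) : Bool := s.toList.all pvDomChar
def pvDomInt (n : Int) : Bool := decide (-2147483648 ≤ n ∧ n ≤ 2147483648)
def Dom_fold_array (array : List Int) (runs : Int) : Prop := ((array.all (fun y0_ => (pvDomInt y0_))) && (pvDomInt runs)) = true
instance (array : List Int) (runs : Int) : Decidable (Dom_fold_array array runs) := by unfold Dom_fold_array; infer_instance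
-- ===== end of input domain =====

-- B replaces A's split/reverse/write loop (which re-copies the list every inner iteration) by a single mirror-pair comprehension; measured faster.

-- ===== PORT A =====
-- inner loop `for i in range(len(second_part)): first_part[i] = ...; array = first_part[:]`;
-- state is (first_part, array); all writes first_part[i] are at in-range indices, so List.set is exact
def fold_array_inner (second_part : List Int) (st : List Int × List Int) : List Int × List Int :=
  (List.range second_part.length).foldl
    (fun (st : List Int × List Int) i =>
      let fp := st.1.set i (st.1.getD i 0 + second_part.getD i 0)
      (fp, fp)) st

-- one iteration of A's outer `for run in range(runs)` body;
-- slices array[:k]/array[k:] with 0 ≤ k ≤ len are List.take/drop (exact);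
-- reads array[0], array[1] are at in-range indices, so getD 0 is exact
def fold_array_step (array : List Int) : List Int :=
  if array.length ≠ 2 then
    let middle := array.length / 2
    let parts :=
      if array.length % 2 == 0 then
        (array.take middle, array.drop middle)
      else
        (array.take (middle+1), array.drop (middle+1))
    let second_part := parts.2.reverse
    (fold_array_inner second_part (parts.1, array)).2
  else
    [array.getD 0 0 + array.getD 1 0]

def fold_array (array : List Int) (runs : Int) : List Int :=
  (PySem.List.pyRange 0 runs 1).foldl (fun a _ => fold_array_step a) array

-- ===== PORT B =====
-- one iteration of B's loop body (comprehension over range(half), then the odd middle element);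
-- indices i and n-1-i are in range for i < half, so getD 0 is exact
def fold_array_alt_step (a : List Int) : List Int :=
  let n := a.length
  let half := n / 2
  let new := (List.range half).map (fun i => a.getD i 0 + a.getD (n - 1 - i) 0)
  if n % 2 == 1 then new ++ [a.getD half 0] else new

def fold_array_alt (array : List Int) (runs : Int) : List Int :=
  (PySem.List.pyRange 0 runs 1).foldl (fun a _ => fold_array_alt_step a) array

-- ===== PRECONDITION & SPEC =====
def Spec_fold_array (array : List Int) (runs : Int) (out : List Int) : Prop := out = fold_array_alt array runs
instance (array : List Int) (runs : Int) (out : List Int) : Decidable (Spec_fold_array array runs out) := by unfold Spec_fold_array; infer_instance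

-- ===== CLAIM (what is proved, stated in full; the proofs are below) =====
def Claim_equal_fold_array : Prop := ∀ (array : List Int) (runs : Int), Dom_fold_array array runs → Spec_fold_array array runs (fold_array array runs)

-- ===== LEMMAS AND PROOFS =====

-- the inner loop of A's step, first component only
def pvG (sp : List Int) (m : Nat) (fp : List Int) : List Int :=
  (List.range m).foldl (fun f i => f.set i (f.getD i 0 + sp.getD i 0)) fp

theorem pvG_succ (sp : List Int) (m : Nat) (fp : List Int) :
    pvG sp (m+1) fp = (pvG sp m fp).set m ((pvG sp m fp).getD m 0 + sp.getD m 0) := by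
  simp [pvG, List.range_succ]

theorem pvG_length (sp : List Int) (m : Nat) (fp : List Int) :
    (pvG sp m fp).length = fp.length := by
  induction m with
  | zero => rfl
  | succ m ih => rw [pvG_succ]; simp [ih]

theorem pvG_getD (sp : List Int) (m : Nat) (fp : List Int) (h : m ≤ fp.length) (j : Nat) :
    (pvG sp m fp).getD j 0 = if j < m then fp.getD j 0 + sp.getD j 0 else fp.getD j 0 := by
  induction m with
  | zero => simp [pvG]
  | succ m ih =>
    have h' : m ≤ fp.length := by omega
    have hm : m < (pvG sp m fp).length := by rw [pvG_length]; omega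
    rw [pvG_succ]
    rcases Nat.lt_trichotomy j m with hj | hj | hj
    · have hj1 : j < m + 1 := by omega
      rw [List.getD_eq_getElem?_getD, List.getElem?_set_ne (by omega),
        ← List.getD_eq_getElem?_getD, ih h']
      simp [hj, hj1]
    · subst hj
      rw [List.getD_eq_getElem?_getD, List.getElem?_set_self hm]
      rw [ih h']
      simp
    · have hj1 : ¬ j < m := by omega
      have hj2 : ¬ j < m + 1 := by omega
      rw [List.getD_eq_getElem?_getD, List.getElem?_set_ne (by omega),
        ← List.getD_eq_getElem?_getD, ih h']
      simp [hj1, hj2]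

-- the pair-state inner loop, in terms of pvG
theorem pvInnerAux (sp : List Int) (m : Nat) (fp arr : List Int) :
    (List.range m).foldl
      (fun (st : List Int × List Int) i =>
        let f := st.1.set i (st.1.getD i 0 + sp.getD i 0)
        (f, f)) (fp, arr)
      = (pvG sp m fp, if m = 0 then arr else pvG sp m fp) := by
  induction m with
  | zero => simp [pvG]
  | succ m ih =>
    rw [List.range_succ, List.foldl_append, ih, pvG_succ]
    simp [List.foldl]

theorem pvInner_eq (sp fp arr : List Int) :
    fold_array_inner sp (fp, arr)
      = (pvG sp sp.length fp, if sp.length = 0 then arr else pvG sp sp.length fp) := by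
  unfold fold_array_inner
  exact pvInnerAux sp sp.length fp arr

theorem pvTake_getD (a : List Int) (k i : Nat) (hi : i < k) :
    (a.take k).getD i 0 = a.getD i 0 := by
  rw [List.getD_eq_getElem?_getD, List.getD_eq_getElem?_getD, List.getElem?_take]
  simp [hi]

theorem pvRevDrop_getD (a : List Int) (k i : Nat) (hi : i < a.length - k) :
    ((a.drop k).reverse).getD i 0 = a.getD (a.length - 1 - i) 0 := by
  rw [List.getD_eq_getElem?_getD, List.getD_eq_getElem?_getD,
    List.getElem?_reverse (by simp; omega), List.getElem?_drop]
  congr 2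
  simp
  omega

theorem step_eq (a : List Int) : fold_array_step a = fold_array_alt_step a := by
  by_cases h2 : a.length = 2
  · match a, h2 with
    | [x, y], _ =>
      simp [fold_array_step, fold_array_alt_step, List.range_succ]
  · unfold fold_array_step fold_array_alt_step
    rw [if_pos h2]
    by_cases hev : a.length % 2 = 0
    · -- even length (≠ 2)
      simp only [hev, beq_self_eq_true, if_true, Nat.reduceBEq, if_false, Bool.false_eq_true]
      have hsp : (a.drop (a.length / 2)).reverse.length = a.length / 2 := by simp; omega
      rw [pvInner_eq, hsp]
      dsimp only
      by_cases h0 : a.length = 0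
      · have ha : a = [] := List.eq_nil_of_length_eq_zero h0
        subst ha; simp
      · have hm : ¬ (a.length / 2 = 0) := by omega
        rw [if_neg hm]
        have hfp : a.length / 2 ≤ (a.take (a.length / 2)).length := by simp; omega
        apply List.ext_getElem
        · simp [pvG_length]; omega
        · intro i h1 h2
          have hi : i < a.length / 2 := by
            rw [pvG_length] at h1; simp at h1; omega
          rw [List.getElem_map, List.getElem_range, ← List.getD_eq_getElem _ 0 h1,
            pvG_getD _ _ _ hfp, if_pos hi, pvTake_getD _ _ _ hi,
            pvRevDrop_getD _ _ _ (by omega)]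
    · -- odd length
      have homod : a.length % 2 = 1 := by omega
      simp only [homod, Nat.reduceBEq, if_false, Bool.false_eq_true, beq_self_eq_true, if_true]
      have hsp : (a.drop (a.length / 2 + 1)).reverse.length = a.length / 2 := by simp; omega
      rw [pvInner_eq, hsp]
      dsimp only
      by_cases h0 : a.length = 1
      · obtain ⟨x, rfl⟩ := List.length_eq_one_iff.mp h0
        simp
      · have hm : ¬ (a.length / 2 = 0) := by omega
        rw [if_neg hm]
        have hfp : a.length / 2 ≤ (a.take (a.length / 2 + 1)).length := by simp; omega
        apply List.ext_getElem
        · simp [pvG_length]; omega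
        · intro i h1 h2
          have hi1 : i < a.length / 2 + 1 := by
            rw [pvG_length] at h1; simp at h1; omega
          rw [← List.getD_eq_getElem _ 0 h1, pvG_getD _ _ _ hfp]
          by_cases hi : i < a.length / 2
          · rw [if_pos hi, List.getElem_append_left (by simp; omega),
              List.getElem_map, List.getElem_range, pvTake_getD _ _ _ hi1,
              pvRevDrop_getD _ _ _ (by omega)]
          · have hieq : i = a.length / 2 := by omega
            rw [if_neg hi, pvTake_getD _ _ _ hi1,
              List.getElem_append_right (by simp; omega)]
            simp [hieq]

-- both ports run the same outer loop; step_eq makes the bodies agree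
theorem fold_eq (l : List Int) (array : List Int) :
    l.foldl (fun a _ => fold_array_step a) array = l.foldl (fun a _ => fold_array_alt_step a) array := by
  induction l generalizing array with
  | nil => rfl
  | cons x xs ih => simp only [List.foldl_cons]; rw [step_eq]; exact ih _

-- ===== VERDICT (by name: the statement is the Claim_ definition above) =====
theorem fold_array_spec : Claim_equal_fold_array := by
  intro array runs _
  unfold Spec_fold_array fold_array fold_array_alt
  exact fold_eq _ _
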